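-- pv_equiv track=rewrite | github.com/jrothbaum/survey_kit_data | src/survey_kit_data/fed/scf.py | path_for_year
-- ===== SOURCE A (Python) =====
-- def path_for_year(year:int,
--                   replicate:bool=False) -> str:
--
--     years = [2004, 2007, 2010, 2013, 2016, 2019, 2022]
--
--     if replicate:
--         years_short = [1989, 1992, 1995, 1998]
--         years = [2001] + years
--         d_files = {yeari:f"https://www.federalreserve.gov/econres/files/scf{yeari}rw1s.zip" for yeari in years}
--
--         for yeari in years_short:
--             d_files[yeari] = f"https://www.federalreserve.gov/econres/files/scf{str(yeari)[2:]}rw1s.zip"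
--
--
--         return d_files[year]
--     else:
--         years_short = [1989, 1992, 1995, 1998, 2001]
--
--         d_files = {yeari:f"https://www.federalreserve.gov/econres/files/scf{yeari}s.zip" for yeari in years}
--
--         for yeari in years_short:
--             d_files[yeari] = f"https://www.federalreserve.gov/econres/files/scf{str(yeari)[2:]}s.zip"
--
--
--         return d_files[year]
-- ===== SOURCE B (Python) =====
-- def path_for_year(year: int, replicate: bool = False) -> str:
--     # Compute the single URL directly instead of building the whole year->URL dict.
--     is_full = year in (2004, 2007, 2010, 2013, 2016, 2019, 2022) or (year == 2001 and replicate)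
--     is_short = year in (1989, 1992, 1995, 1998) or (year == 2001 and not replicate)
--     if not (is_full or is_short):
--         raise KeyError(year)
--     token = str(year) if is_full else str(year)[2:]
--     infix = "rw1" if replicate else ""
--     return f"https://www.federalreserve.gov/econres/files/scf{token}{infix}s.zip"
-- ===== Notes on version B (the rewrite author's own statement) =====
-- stated objective: simpler
-- what changed: B classifies the year as full-token or short-token and formats the one requested URL directly, instead of building a dict of all year-to-URL mappings and indexing it.
import Mathlib
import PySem

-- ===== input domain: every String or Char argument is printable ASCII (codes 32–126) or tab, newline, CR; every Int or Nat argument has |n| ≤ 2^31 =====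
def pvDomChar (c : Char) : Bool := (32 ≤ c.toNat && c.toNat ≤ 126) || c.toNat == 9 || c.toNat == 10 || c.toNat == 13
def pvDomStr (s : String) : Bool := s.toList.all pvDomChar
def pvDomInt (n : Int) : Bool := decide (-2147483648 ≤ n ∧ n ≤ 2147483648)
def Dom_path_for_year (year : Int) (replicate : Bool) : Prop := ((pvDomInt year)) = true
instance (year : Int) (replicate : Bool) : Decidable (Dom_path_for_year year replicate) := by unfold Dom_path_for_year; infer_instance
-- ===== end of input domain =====

-- B computes the single requested URL directly (full-token / short-token classification)
-- instead of building the whole year->URL dict and indexing it; objective: simpler.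


-- ===== PORT A =====
-- literal transliteration of A: build the dict (comprehension as a foldl of inserts, then
-- the for-loop of short-year inserts), then index it; d_files[year] raises KeyError on a
-- missing key, which Pre_ excludes, so the lookup's `none` is mapped to "".
def path_for_year (year : Int) (replicate : Bool) : String :=
  let years : List Int := [2004, 2007, 2010, 2013, 2016, 2019, 2022]
  if replicate then
    let years_short : List Int := [1989, 1992, 1995, 1998]
    let years := [(2001 : Int)] ++ years
    let d_files : PySem.Dict Int String :=
      years.foldl (fun d yeari =>
        d.insert yeari ("https://www.federalreserve.gov/econres/files/scf" ++ PySem.Int.toStr yeari ++ "rw1s.zip")) PySem.Dict.empty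
    let d_files :=
      years_short.foldl (fun d yeari =>
        d.insert yeari ("https://www.federalreserve.gov/econres/files/scf" ++ String.ofList (PySem.List.slice (PySem.Int.toChars yeari) (some 2) none) ++ "rw1s.zip")) d_files
    (d_files.get? year).getD ""
  else
    let years_short : List Int := [1989, 1992, 1995, 1998, 2001]
    let d_files : PySem.Dict Int String :=
      years.foldl (fun d yeari =>
        d.insert yeari ("https://www.federalreserve.gov/econres/files/scf" ++ PySem.Int.toStr yeari ++ "s.zip")) PySem.Dict.empty
    let d_files :=
      years_short.foldl (fun d yeari =>
        d.insert yeari ("https://www.federalreserve.gov/econres/files/scf" ++ String.ofList (PySem.List.slice (PySem.Int.toChars yeari) (some 2) none) ++ "s.zip")) d_files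
    (d_files.get? year).getD ""

-- ===== PORT B =====
-- transliteration of Source B; B raises KeyError on unknown years (excluded by Pre_), so the
-- raise branch is mapped to "".
def path_for_year_alt (year : Int) (replicate : Bool) : String :=
  let is_full : Bool := ([2004, 2007, 2010, 2013, 2016, 2019, 2022] : List Int).contains year || (year == 2001 && replicate)
  let is_short : Bool := ([1989, 1992, 1995, 1998] : List Int).contains year || (year == 2001 && !replicate)
  if !(is_full || is_short) then ""
  else
    let token := if is_full then PySem.Int.toStr year else String.ofList (PySem.List.slice (PySem.Int.toChars year) (some 2) none)
    let infix_ := if replicate then "rw1" else ""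
    "https://www.federalreserve.gov/econres/files/scf" ++ token ++ infix_ ++ "s.zip"

-- ===== PRECONDITION & SPEC =====
-- Pre_ excludes exactly the years absent from the dict, on which A raises KeyError.
def Pre_path_for_year (year : Int) (replicate : Bool) : Prop :=
  year ∈ ([1989, 1992, 1995, 1998, 2001, 2004, 2007, 2010, 2013, 2016, 2019, 2022] : List Int)
instance (year : Int) (replicate : Bool) : Decidable (Pre_path_for_year year replicate) := by unfold Pre_path_for_year; infer_instance
def pvWitness_path_for_year : Int × Bool := (2019, true)

def Spec_path_for_year (year : Int) (replicate : Bool) (out : String) : Prop := out = path_for_year_alt year replicate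
instance (year : Int) (replicate : Bool) (out : String) : Decidable (Spec_path_for_year year replicate out) := by unfold Spec_path_for_year; infer_instance

-- ===== CLAIM (what is proved, stated in full; the proofs are below) =====
def Claim_equal_path_for_year : Prop := ∀ (year : Int) (replicate : Bool), Dom_path_for_year year replicate → Pre_path_for_year year replicate → Spec_path_for_year year replicate (path_for_year year replicate)

-- ===== LEMMAS AND PROOFS =====

-- ===== VERDICT (by name: the statement is the Claim_ definition above) =====
theorem path_for_year_spec : Claim_equal_path_for_year := by
  intro year replicate _ hpre
  unfold Pre_path_for_year at hpre
  unfold Spec_path_for_year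
  simp only [List.mem_cons, List.not_mem_nil, or_false] at hpre
  rcases hpre with h | h | h | h | h | h | h | h | h | h | h | h <;> subst h <;>
    cases replicate <;> decide
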